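-- pv_equiv track=rewrite | github.com/gcostese/girabase_streamlit | engine.py | calculer_flux_circulant
-- ===== SOURCE A (Python) =====
-- def calculer_flux_circulant(matrice_od):
--     """
--     Calcule le flux circulant (Qg) devant chaque entrée i.
--     Logique : Un flux de l'origine j vers la destination k gêne l'entrée i
--     si l'entrée i se trouve physiquement entre j et k sur l'anneau.
--     """
--     n = len(matrice_od)
--     q_genant = [0] * n
--
--     for i in range(n):
--         flux_cumule = 0
--         # On parcourt toutes les combinaisons Origine (j) -> Destination (k)
--         for j in range(n):
--             for k in range(n):
--                 if j == k:
--                     continue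
--
--                 # Un véhicule venant de j et allant vers k gêne l'entrée i si :
--                 # 1. Il n'est pas originaire de i (j != i)
--                 # 2. Il ne sort pas à i (k != i)
--                 # 3. Son trajet sur l'anneau passe devant l'entrée i.
--
--                 # Pour vérifier si i est sur le chemin entre j et k :
--                 # On regarde si i est compris entre j et k dans le sens horaire.
--                 est_sur_le_chemin = False
--                 if j < k:
--                     # Trajet simple (ex: de 0 vers 2, passe par 1)
--                     if j < i < k:
--                         est_sur_le_chemin = True
--                 else:
--                     # Trajet passant par le point de bouclage (ex: de 3 vers 1, passe par 0)
--                     if i > j or i < k: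
--                         est_sur_le_chemin = True
--
--                 if est_sur_le_chemin:
--                     flux_cumule += matrice_od[j][k]
--
--         q_genant[i] = flux_cumule
--
--     return q_genant
-- ===== SOURCE B (Python) =====
-- def calculer_flux_circulant(matrice_od):
--     # Difference array: each OD pair (j,k) range-adds its flow over the circular
--     # arc of entrances strictly between j and k; one prefix sum gives all Qg.
--     n = len(matrice_od)
--     diff = [0] * (n + 1)
--     for j in range(n):
--         row = matrice_od[j]
--         for k in range(n):
--             if k == j:
--                 continue
--             v = row[k]
--             if j < k:
--                 # arc j+1 .. k-1
--                 diff[j + 1] += v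
--                 diff[k] -= v
--             else:
--                 # wraps: arc j+1 .. n-1 and 0 .. k-1
--                 diff[j + 1] += v
--                 diff[n] -= v
--                 diff[0] += v
--                 diff[k] -= v
--     out = []
--     s = 0
--     for i in range(n):
--         s += diff[i]
--         out.append(s)
--     return out
-- ===== Notes on version B (the rewrite author's own statement) =====
-- stated objective: faster
-- what changed: Replaces the O(n^3) per-entrance triple loop with a difference array: each OD pair range-adds its flow over its circular arc and a single prefix sum yields all entrances.
-- outside the precondition, e.g. on calculer_flux_circulant([[0, 1, 2], [3, 0], [5, 6, 0]]): A returns [6, 2, 3], B raises IndexError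
import Mathlib
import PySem

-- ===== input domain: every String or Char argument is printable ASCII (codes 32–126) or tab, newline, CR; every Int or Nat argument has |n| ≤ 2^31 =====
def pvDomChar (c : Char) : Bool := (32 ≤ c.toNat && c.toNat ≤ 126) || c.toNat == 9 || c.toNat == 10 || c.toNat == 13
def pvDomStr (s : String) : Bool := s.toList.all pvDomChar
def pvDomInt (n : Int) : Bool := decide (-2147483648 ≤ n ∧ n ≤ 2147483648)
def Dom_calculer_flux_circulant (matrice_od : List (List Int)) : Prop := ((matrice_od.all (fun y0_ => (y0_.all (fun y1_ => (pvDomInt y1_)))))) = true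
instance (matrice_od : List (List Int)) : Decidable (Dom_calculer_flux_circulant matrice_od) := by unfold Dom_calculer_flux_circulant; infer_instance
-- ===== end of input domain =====

-- B replaces A's O(n^3) per-entrance triple loop by a difference array (range-add each
-- OD pair's flow over its circular arc, then one prefix sum): asymptotically faster.

-- ===== PORT A =====
-- literal port of A: for each entrance i, sum matrice_od[j][k] over all pairs j≠k whose
-- clockwise arc passes in front of i.  Indices produced by range(n) are nonnegative and
-- in range, so q_genant[i] = flux is ported as List.set i.toNat.
def calculer_flux_circulant (matrice_od : List (List Int)) : List Int :=
  (PySem.List.pyRange 0 (matrice_od.length : Int) 1).foldl (fun q_genant i =>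
    q_genant.set i.toNat
      ((PySem.List.pyRange 0 (matrice_od.length : Int) 1).foldl (fun acc j =>
        (PySem.List.pyRange 0 (matrice_od.length : Int) 1).foldl (fun acc k =>
          if j == k then acc
          else
            if (if j < k then decide (j < i) && decide (i < k)
                else decide (i > j) || decide (i < k)) then
              -- matrice_od[j][k]: in range on Pre_ (row length ≥ n), so pyGetD is exact
              acc + PySem.List.pyGetD (PySem.List.pyGetD matrice_od j []) k 0
            else acc) acc) 0))
    (List.replicate matrice_od.length 0)

-- ===== PORT B =====
-- diff[idx] += v for an idx that is always a valid nonnegative index in B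
def pvBump (diff : List Int) (idx : Int) (v : Int) : List Int :=
  diff.set idx.toNat (PySem.List.pyGetD diff idx 0 + v)

-- the difference-array building loop of B ("for j ... for k ... diff[...] ±= v")
def pvDiffArray (matrice_od : List (List Int)) : List Int :=
  (PySem.List.pyRange 0 (matrice_od.length : Int) 1).foldl (fun diff j =>
    (PySem.List.pyRange 0 (matrice_od.length : Int) 1).foldl (fun diff k =>
      if k == j then diff
      else
        if j < k then
          -- arc j+1 .. k-1
          pvBump (pvBump diff (j + 1) (PySem.List.pyGetD (PySem.List.pyGetD matrice_od j []) k 0))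
            k (-(PySem.List.pyGetD (PySem.List.pyGetD matrice_od j []) k 0))
        else
          -- wraps: arc j+1 .. n-1 and 0 .. k-1
          pvBump (pvBump (pvBump (pvBump diff (j + 1)
              (PySem.List.pyGetD (PySem.List.pyGetD matrice_od j []) k 0))
              (matrice_od.length : Int) (-(PySem.List.pyGetD (PySem.List.pyGetD matrice_od j []) k 0)))
              0 (PySem.List.pyGetD (PySem.List.pyGetD matrice_od j []) k 0))
            k (-(PySem.List.pyGetD (PySem.List.pyGetD matrice_od j []) k 0))) diff)
    (List.replicate (matrice_od.length + 1) 0)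

def calculer_flux_circulant_alt (matrice_od : List (List Int)) : List Int :=
  ((PySem.List.pyRange 0 (matrice_od.length : Int) 1).foldl (fun (p : List Int × Int) i =>
      (p.1 ++ [p.2 + PySem.List.pyGetD (pvDiffArray matrice_od) i 0],
       p.2 + PySem.List.pyGetD (pvDiffArray matrice_od) i 0)) ([], 0)).1

-- ===== PRECONDITION & SPEC =====
-- Pre_ excludes ragged matrices (some row shorter than the matrix): on almost all of them
-- A itself raises IndexError; on the few where only entries with an empty arc are missing
-- A still returns but B's eager read of every off-diagonal entry raises IndexError.
def Pre_calculer_flux_circulant (matrice_od : List (List Int)) : Prop :=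
  ∀ row ∈ matrice_od, matrice_od.length ≤ row.length
instance (matrice_od : List (List Int)) : Decidable (Pre_calculer_flux_circulant matrice_od) := by unfold Pre_calculer_flux_circulant; infer_instance

def pvWitness_calculer_flux_circulant : List (List Int) := [[0, 1, 2], [3, 0, 4], [5, 6, 0]]

def Spec_calculer_flux_circulant (matrice_od : List (List Int)) (out : List Int) : Prop := out = calculer_flux_circulant_alt matrice_od
instance (matrice_od : List (List Int)) (out : List Int) : Decidable (Spec_calculer_flux_circulant matrice_od out) := by unfold Spec_calculer_flux_circulant; infer_instance

-- ===== CLAIM (what is proved, stated in full; the proofs are below) =====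
def Claim_equal_calculer_flux_circulant : Prop := ∀ (matrice_od : List (List Int)), Dom_calculer_flux_circulant matrice_od → Pre_calculer_flux_circulant matrice_od → Spec_calculer_flux_circulant matrice_od (calculer_flux_circulant matrice_od)

-- ===== LEMMAS AND PROOFS =====


-- the value matrice_od[j][k] (both ports read it through pyGetD at Nat indices)
def pvVal (m : List (List Int)) (j k : Nat) : Int := (m.getD j []).getD k 0

-- the arc condition of A, as a Nat predicate
def pvCond (j k i : Nat) : Bool :=
  if j = k then false
  else if j < k then decide (j < i) && decide (i < k)
  else decide (i > j) || decide (i < k)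

-- the common specification: flow in front of entrance i
def pvS (m : List (List Int)) (i : Nat) : Int :=
  ((List.range m.length).map (fun j =>
    ((List.range m.length).map (fun k =>
      if pvCond j k i then pvVal m j k else 0)).sum)).sum

-- ---- A side ----

theorem pv_foldl_set_length (f : Nat → Int) (L : List Nat) (q : List Int) :
    (L.foldl (fun q i => q.set i (f i)) q).length = q.length := by
  induction L generalizing q with
  | nil => rfl
  | cons a L ih => simp [List.foldl_cons, ih]

theorem pv_foldl_set_getElem (f : Nat → Int) (L : List Nat) (q : List Int) (i : Nat)
    (h : i < (L.foldl (fun q i => q.set i (f i)) q).length) (h' : i < q.length) :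
    (L.foldl (fun q i => q.set i (f i)) q)[i] = if i ∈ L then f i else q[i] := by
  induction L generalizing q with
  | nil => simp
  | cons a L ih =>
    simp only [List.foldl_cons]
    rw [ih _ (by simpa [pv_foldl_set_length] using h') (by simpa using h')]
    by_cases hiL : i ∈ L
    · simp [hiL]
    · rcases eq_or_ne i a with rfl | hia
      · simp [hiL]
      · simp [hiL, hia]
        exact List.getElem_set_ne (fun hc => hia hc.symm) _

theorem pv_flux_eq (m : List (List Int)) (i : Nat) :
    (PySem.List.pyRange 0 (m.length : Int) 1).foldl (fun acc j =>
      (PySem.List.pyRange 0 (m.length : Int) 1).foldl (fun acc k =>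
        if j == k then acc
        else
          if (if j < k then decide (j < (i : Int)) && decide ((i : Int) < k)
              else decide ((i : Int) > j) || decide ((i : Int) < k)) then
            acc + PySem.List.pyGetD (PySem.List.pyGetD m j []) k 0
          else acc) acc) 0 = pvS m i := by
  rw [PySem.List.pyRange_zero_natCast, List.foldl_map]
  unfold pvS
  rw [List.foldl_ext (g := fun acc (j : Nat) =>
        acc + ((List.range m.length).map (fun k =>
          if pvCond j k i then pvVal m j k else 0)).sum)]
  · rw [PySem.List.foldl_add]; simp
  · intro acc j hj
    rw [List.foldl_map,
        List.foldl_ext (g := fun acc (k : Nat) =>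
          acc + (if pvCond j k i then pvVal m j k else 0))]
    · rw [PySem.List.foldl_add]
    · intro acc k hk
      simp only [pvCond, pvVal, PySem.List.pyGetD_natCast, beq_iff_eq, Nat.cast_inj,
        Nat.cast_lt, gt_iff_lt]
      by_cases hjk : j = k
      · simp [hjk]
      · simp only [hjk, if_false]
        split_ifs <;> simp_all

theorem pvA_eq (m : List (List Int)) :
    calculer_flux_circulant m = (List.range m.length).map (pvS m) := by
  unfold calculer_flux_circulant
  simp only [PySem.List.pyRange_zero_natCast, List.foldl_map]
  rw [List.foldl_ext (g := fun (q : List Int) (i : Nat) => q.set i (pvS m i))]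
  · apply List.ext_getElem
    · simp [pv_foldl_set_length]
    · intro i h1 h2
      rw [pv_foldl_set_getElem _ _ _ _ h1 (by simpa [pv_foldl_set_length] using h1)]
      have hi : i < m.length := by simpa [pv_foldl_set_length] using h1
      simp [hi]
  · intro q i _
    simp only [Int.toNat_natCast]
    congr 1
    rw [← pv_flux_eq m i]
    simp only [PySem.List.pyRange_zero_natCast, List.foldl_map]

-- ---- B side ----

theorem pv_sum_set (l : List Int) (a : Nat) (x : Int) (h : a < l.length) :
    (l.set a x).sum = l.sum - l[a] + x := by
  induction l generalizing a with
  | nil => simp at h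
  | cons b l ih =>
    cases a with
    | zero => simp; ring
    | succ a =>
      simp only [List.set_cons_succ, List.sum_cons, ih a (by simpa using h),
        List.getElem_cons_succ]
      ring

theorem pv_take_sum_set (l : List Int) (a : Nat) (x : Int) (ha : a < l.length) (i : Nat) :
    ((l.set a x).take (i+1)).sum = (l.take (i+1)).sum + (if a ≤ i then x - l.getD a 0 else 0) := by
  by_cases hai : a ≤ i
  · have ha' : a < (l.take (i+1)).length := by simp; omega
    rw [List.take_set, pv_sum_set _ _ _ ha', List.getElem_take, List.getD_eq_getElem l 0 ha]
    simp [hai]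
    ring
  · rw [List.take_set_of_le (by omega)]
    simp [hai]

theorem pvBump_length (diff : List Int) (idx v : Int) :
    (pvBump diff idx v).length = diff.length := by
  simp [pvBump]

theorem pvBump_P (diff : List Int) (a : Nat) (v : Int) (ha : a < diff.length) (i : Nat) :
    ((pvBump diff (a : Int) v).take (i+1)).sum
      = (diff.take (i+1)).sum + (if a ≤ i then v else 0) := by
  unfold pvBump
  simp only [PySem.List.pyGetD_natCast, Int.toNat_natCast]
  rw [pv_take_sum_set _ _ _ ha]
  split <;> simp

-- the Nat-indexed body of B's pair loop
def pvStepN (m : List (List Int)) (j k : Nat) (diff : List Int) : List Int :=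
  if k = j then diff
  else if j < k then
    pvBump (pvBump diff ((j : Int) + 1) (pvVal m j k)) (k : Int) (-(pvVal m j k))
  else
    pvBump (pvBump (pvBump (pvBump diff ((j : Int) + 1) (pvVal m j k))
      (m.length : Int) (-(pvVal m j k))) 0 (pvVal m j k)) (k : Int) (-(pvVal m j k))

theorem pvBump_P0 (diff : List Int) (v : Int) (h0 : 0 < diff.length) (i : Nat) :
    ((pvBump diff 0 v).take (i+1)).sum = (diff.take (i+1)).sum + v := by
  have h := pvBump_P diff 0 v (by simpa using h0) i
  simpa using h

theorem pv_pair_P (m : List (List Int)) (j k i : Nat) (hj : j < m.length) (hk : k < m.length)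
    (hi : i < m.length) (diff : List Int) (hlen : diff.length = m.length + 1) :
    (pvStepN m j k diff).length = m.length + 1 ∧
    ((pvStepN m j k diff).take (i+1)).sum
      = (diff.take (i+1)).sum + (if pvCond j k i then pvVal m j k else 0) := by
  unfold pvStepN pvCond
  by_cases hkj : k = j
  · simp [hkj, hlen]
  · rw [if_neg hkj, if_neg (fun h : j = k => hkj h.symm)]
    have h1 : ((j : Int) + 1) = ((j + 1 : Nat) : Int) := by push_cast; ring
    by_cases hjk : j < k
    · rw [if_pos hjk, if_pos hjk]
      refine ⟨by simp [pvBump_length, hlen], ?_⟩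
      rw [h1,
        pvBump_P (pvBump diff ((j + 1 : Nat) : Int) (pvVal m j k)) k (-(pvVal m j k))
          (by rw [pvBump_length]; omega) i,
        pvBump_P diff (j + 1) (pvVal m j k) (by omega) i]
      simp only [decide_eq_true_eq, Bool.and_eq_true]
      split_ifs <;> omega
    · rw [if_neg hjk, if_neg hjk]
      refine ⟨by simp [pvBump_length, hlen], ?_⟩
      rw [h1,
        pvBump_P (pvBump (pvBump (pvBump diff ((j + 1 : Nat) : Int) (pvVal m j k))
            ((m.length : Nat) : Int) (-(pvVal m j k))) 0 (pvVal m j k)) k (-(pvVal m j k))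
          (by rw [pvBump_length, pvBump_length, pvBump_length]; omega) i,
        pvBump_P0 (pvBump (pvBump diff ((j + 1 : Nat) : Int) (pvVal m j k))
            ((m.length : Nat) : Int) (-(pvVal m j k))) (pvVal m j k)
          (by rw [pvBump_length, pvBump_length]; omega) i,
        pvBump_P (pvBump diff ((j + 1 : Nat) : Int) (pvVal m j k)) m.length (-(pvVal m j k))
          (by rw [pvBump_length]; omega) i,
        pvBump_P diff (j + 1) (pvVal m j k) (by omega) i]
      simp only [decide_eq_true_eq, Bool.or_eq_true, gt_iff_lt]
      split_ifs <;> omega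

theorem pv_innerfold (m : List (List Int)) (j i : Nat) (hj : j < m.length) (hi : i < m.length)
    (ks : List Nat) (diff : List Int) (hlen : diff.length = m.length + 1)
    (hks : ∀ k ∈ ks, k < m.length) :
    (ks.foldl (fun d k => pvStepN m j k d) diff).length = m.length + 1 ∧
    ((ks.foldl (fun d k => pvStepN m j k d) diff).take (i+1)).sum
      = ((diff.take (i+1)).sum)
        + (ks.map (fun k => if pvCond j k i then pvVal m j k else 0)).sum := by
  induction ks generalizing diff with
  | nil => simpa using hlen
  | cons k ks ih =>
    have hk : k < m.length := hks k (by simp)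
    obtain ⟨hl1, hp1⟩ := pv_pair_P m j k i hj hk hi diff hlen
    obtain ⟨hl2, hp2⟩ := ih (pvStepN m j k diff) hl1 (fun k hk' => hks k (by simp [hk']))
    refine ⟨hl2, ?_⟩
    simp only [List.foldl_cons, List.map_cons, List.sum_cons] at *
    rw [hp2, hp1]
    ring

theorem pv_outerfold (m : List (List Int)) (i : Nat) (hi : i < m.length)
    (js : List Nat) (diff : List Int) (hlen : diff.length = m.length + 1)
    (hjs : ∀ j ∈ js, j < m.length) :
    (js.foldl (fun d j => (List.range m.length).foldl (fun d k => pvStepN m j k d) d) diff).length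
      = m.length + 1 ∧
    ((js.foldl (fun d j => (List.range m.length).foldl (fun d k => pvStepN m j k d) d) diff).take
        (i+1)).sum
      = (diff.take (i+1)).sum
        + (js.map (fun j => ((List.range m.length).map
            (fun k => if pvCond j k i then pvVal m j k else 0)).sum)).sum := by
  induction js generalizing diff with
  | nil => simpa using hlen
  | cons j js ih =>
    have hj : j < m.length := hjs j (by simp)
    obtain ⟨hl1, hp1⟩ := pv_innerfold m j i hj hi (List.range m.length) diff hlen
      (fun k hk => List.mem_range.mp hk)
    obtain ⟨hl2, hp2⟩ := ih _ hl1 (fun j hj' => hjs j (by simp [hj']))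
    refine ⟨hl2, ?_⟩
    simp only [List.foldl_cons, List.map_cons, List.sum_cons] at *
    rw [hp2, hp1]
    ring

theorem pv_diffArray_eq (m : List (List Int)) :
    pvDiffArray m = (List.range m.length).foldl
      (fun d j => (List.range m.length).foldl (fun d k => pvStepN m j k d) d)
      (List.replicate (m.length + 1) 0) := by
  unfold pvDiffArray
  simp only [PySem.List.pyRange_zero_natCast, List.foldl_map]
  apply List.foldl_ext
  intro d j _
  apply List.foldl_ext
  intro d' k _
  simp only [pvStepN, pvVal, PySem.List.pyGetD_natCast, beq_iff_eq, Nat.cast_inj, Nat.cast_lt]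

theorem pv_diff_P (m : List (List Int)) (i : Nat) (hi : i < m.length) :
    ((pvDiffArray m).take (i+1)).sum = pvS m i := by
  rw [pv_diffArray_eq]
  obtain ⟨_, hp⟩ := pv_outerfold m i hi (List.range m.length)
    (List.replicate (m.length + 1) 0) (by simp) (fun j hj => List.mem_range.mp hj)
  rw [hp]
  simp [pvS, List.take_replicate]

theorem pv_take_succ_sum (l : List Int) (n : Nat) :
    (l.take (n+1)).sum = (l.take n).sum + l.getD n 0 := by
  cases h : l[n]? <;> simp [List.take_succ, h, List.getD]

theorem pv_outfold (D : List Int) (N : Nat) :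
    (List.range N).foldl (fun (p : List Int × Int) (i : Nat) =>
        (p.1 ++ [p.2 + PySem.List.pyGetD D (i : Int) 0], p.2 + PySem.List.pyGetD D (i : Int) 0))
      ([], 0)
      = ((List.range N).map (fun i => (D.take (i+1)).sum), (D.take N).sum) := by
  induction N with
  | zero => simp
  | succ N ih =>
    rw [List.range_succ, List.foldl_append, ih]
    simp only [List.foldl_cons, List.foldl_nil, List.map_append, List.map_cons, List.map_nil,
      PySem.List.pyGetD_natCast]
    rw [← pv_take_succ_sum]

theorem pvB_eq (m : List (List Int)) :
    calculer_flux_circulant_alt m = (List.range m.length).map (pvS m) := by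
  unfold calculer_flux_circulant_alt
  simp only [PySem.List.pyRange_zero_natCast, List.foldl_map]
  rw [pv_outfold (pvDiffArray m) m.length]
  apply List.map_congr_left
  intro i hi
  exact pv_diff_P m i (List.mem_range.mp hi)

-- ===== VERDICT (by name: the statement is the Claim_ definition above) =====
theorem calculer_flux_circulant_spec : Claim_equal_calculer_flux_circulant := by
  intro m _ _
  unfold Spec_calculer_flux_circulant
  rw [pvA_eq, pvB_eq]
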